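-- pv_equiv track=rewrite | github.com/CDCgov/NEDSS-DataReporting | utilities/local-db-tracing/tracing_post_processing.py | has_post_processing_idle_tail
-- ===== SOURCE A (Python) =====
-- def has_post_processing_idle_tail(events: list[str], idle_message: str) -> bool:
--     """Proceed when latest event is idle and no pending datamart event appears after the idle boundary."""
--
--     if len(events) < 2:
--         return False
--
--     def is_datamart_event(event: str) -> bool:
--         lowered = event.lower()
--         return "processdatamartdata" in lowered and "datamart" in lowered and "stored proc" in lowered
--
--     last_datamart_index = -1
--     for index, event in enumerate(events):
--         if is_datamart_event(event):
--             last_datamart_index = index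
--
--     last_event = events[-1].rstrip()
--     if not last_event.endswith(idle_message):
--         return False
--
--     # The final idle line is only meaningful if it is newer than any datamart stored-proc activity.
--     return len(events) - 1 > last_datamart_index
-- ===== SOURCE B (Python) =====
-- def has_post_processing_idle_tail(events: list[str], idle_message: str) -> bool:
--     """O(1): the idle tail is valid iff the last event ends with the idle
--     message and is not itself a datamart stored-proc event; earlier datamart
--     events are always older than the final line, so the scan is unnecessary."""
--     if len(events) < 2:
--         return False
--     last = events[-1]
--     if not last.rstrip().endswith(idle_message):
--         return False
--     lowered = last.lower()
--     return not ("processdatamartdata" in lowered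
--                 and "datamart" in lowered
--                 and "stored proc" in lowered)
-- ===== Notes on version B (the rewrite author's own statement) =====
-- stated objective: simpler
-- what changed: Replaces the full scan for the last datamart index with an O(1) check of only the final event: 'len(events)-1 > last_datamart_index' holds exactly when the last event is not a datamart event.
import Mathlib
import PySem

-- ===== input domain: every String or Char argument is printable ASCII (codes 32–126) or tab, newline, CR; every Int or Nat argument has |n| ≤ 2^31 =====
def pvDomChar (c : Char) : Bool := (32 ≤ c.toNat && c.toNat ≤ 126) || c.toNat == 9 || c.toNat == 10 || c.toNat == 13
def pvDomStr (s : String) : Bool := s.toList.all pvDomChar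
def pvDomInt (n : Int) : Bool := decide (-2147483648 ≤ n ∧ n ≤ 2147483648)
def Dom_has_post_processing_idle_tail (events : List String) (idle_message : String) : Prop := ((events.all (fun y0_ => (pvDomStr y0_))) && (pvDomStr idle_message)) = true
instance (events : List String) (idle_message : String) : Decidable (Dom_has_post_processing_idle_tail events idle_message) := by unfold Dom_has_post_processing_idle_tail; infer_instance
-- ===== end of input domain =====

-- B replaces A's scan for the last datamart index by an O(1) check of the final event only.
-- ===== PORT A =====
def pvIsDatamartEvent (event : String) : Bool :=
  let lowered := PySem.Str.lower event
  PySem.Str.isIn "processdatamartdata" lowered && PySem.Str.isIn "datamart" lowered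
    && PySem.Str.isIn "stored proc" lowered

def has_post_processing_idle_tail (events : List String) (idle_message : String) : Bool :=
  if events.length < 2 then false
  else
    let last_datamart_index : Int :=
      (PySem.List.enumerate events 0).foldl
        (fun acc p => if pvIsDatamartEvent p.2 then p.1 else acc) (-1)
    -- events[-1]: in range since events.length ≥ 2, so .getD "" is never taken
    let last_event := PySem.Str.rstrip ((PySem.List.pyGet? events (-1)).getD "")
    if !(PySem.Str.endswith last_event idle_message) then false
    else decide ((events.length : Int) - 1 > last_datamart_index)

-- ===== PORT B =====
def has_post_processing_idle_tail_alt (events : List String) (idle_message : String) : Bool :=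
  if events.length < 2 then false
  else
    -- events[-1]: in range since events.length ≥ 2, so .getD "" is never taken
    let last := (PySem.List.pyGet? events (-1)).getD ""
    if !(PySem.Str.endswith (PySem.Str.rstrip last) idle_message) then false
    else
      let lowered := PySem.Str.lower last
      !(PySem.Str.isIn "processdatamartdata" lowered && PySem.Str.isIn "datamart" lowered
          && PySem.Str.isIn "stored proc" lowered)

-- ===== PRECONDITION & SPEC =====
def Spec_has_post_processing_idle_tail (events : List String) (idle_message : String) (out : Bool) : Prop := out = has_post_processing_idle_tail_alt events idle_message
instance (events : List String) (idle_message : String) (out : Bool) : Decidable (Spec_has_post_processing_idle_tail events idle_message out) := by unfold Spec_has_post_processing_idle_tail; infer_instance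

-- ===== CLAIM (what is proved, stated in full; the proofs are below) =====
def Claim_equal_has_post_processing_idle_tail : Prop := ∀ (events : List String) (idle_message : String), Dom_has_post_processing_idle_tail events idle_message → Spec_has_post_processing_idle_tail events idle_message (has_post_processing_idle_tail events idle_message)

-- ===== LEMMAS AND PROOFS =====

-- ===== VERDICT (by name: the statement is the Claim_ definition above) =====
-- the fold tracking the last datamart index never exceeds s + xs.length - 1
theorem pv_fold_lt (xs : List String) (s a : Int) (h : a < s + xs.length) :
    (PySem.List.enumerate xs s).foldl
      (fun acc p => if pvIsDatamartEvent p.2 then p.1 else acc) a < s + xs.length := by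
  induction xs generalizing s a with
  | nil => simpa using h
  | cons x xs ih =>
    rw [PySem.List.enumerate_cons, List.foldl_cons]
    simp only [List.length_cons] at h ⊢
    have h1 : (if pvIsDatamartEvent x then s else a) < (s + 1) + (xs.length : Int) := by
      split <;> push_cast at h ⊢ <;> omega
    have h2 := ih (s + 1) _ h1
    push_cast at h2 ⊢
    omega

theorem has_post_processing_idle_tail_spec : Claim_equal_has_post_processing_idle_tail := by
  intro events idle_message _
  unfold Spec_has_post_processing_idle_tail
  unfold has_post_processing_idle_tail has_post_processing_idle_tail_alt
  by_cases hlen : events.length < 2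
  · simp [hlen]
  · simp only [hlen, if_false]
    rcases events.eq_nil_or_concat with rfl | ⟨ys, z, rfl⟩
    · exact (hlen (by simp)).elim
    · simp only [List.concat_eq_append] at hlen ⊢
      have hget : PySem.List.pyGet? (ys ++ [z]) (-1) = some z := by
        simp [PySem.List.pyGet?, PySem.List.pyIdx?]
      rw [hget]
      simp only [Option.getD_some]
      by_cases hend : PySem.Str.endswith (PySem.Str.rstrip z) idle_message
      · simp only [hend, Bool.not_true]
        rw [PySem.List.enumerate_append, List.foldl_append]
        simp only [PySem.List.enumerate_cons, PySem.List.enumerate_nil, List.foldl_cons,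
          List.foldl_nil, List.length_append, List.length_singleton]
        by_cases hdm : pvIsDatamartEvent z
        · rw [if_pos hdm]
          have hz : pvIsDatamartEvent z = true := hdm
          simp only [pvIsDatamartEvent] at hz
          simp only [hz, Bool.not_true]
          push_cast
          simp
        · rw [if_neg hdm]
          have hr := pv_fold_lt ys 0 (-1) (by omega)
          have hz : pvIsDatamartEvent z = false := by simpa using hdm
          simp only [pvIsDatamartEvent] at hz
          simp only [hz, Bool.not_false]
          push_cast
          push_cast at hr
          simp only [decide_eq_true_eq]
          omega
      · have hend' : PySem.Chars.endswith (PySem.Chars.rstrip z.toList) idle_message.toList = false := by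
          simpa [PySem.Str.endswith, PySem.Str.rstrip] using hend
        simp [hend']
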